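-- pv_equiv track=rewrite | github.com/yxicun89/AtcoderWA | submissions_typical90_bo_gpt/submission_38.py | EtoN
-- ===== SOURCE A (Python) =====
-- def EtoN(num):
--
--     E_digits = []
--
--     N_digits = []
--
--     Ten = 0
--
--     Nine = 0
--
--     while num > 0:
--
--         E_digits.append(num % 10)
--
--         num //= 10
--
--
--
--     for i in range(len(E_digits)):
--
--         Ten += E_digits[i] * 8**i
--
--
--
--     while Ten > 0:
--
--         N_digits.append(Ten % 9)
--
--         Ten //= 9
--
--
--
--     for i in range(len(N_digits)):
--
--         Nine += N_digits[i] * 9**i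
--
--
--
--     return int(str(Nine).replace("8", "5"))
-- ===== SOURCE B (Python) =====
-- def EtoN(num):
--     # One recursion replaces A's four loops: reinterpret the decimal digits in
--     # base 8 directly (Horner from the least significant digit); A's base-9
--     # decompose-and-reconstruct is the identity on nonnegative ints, so it is dropped.
--     def reinterp(n):
--         if n <= 0:
--             return 0
--         return n % 10 + 8 * reinterp(n // 10)
--     return int(str(reinterp(num)).replace("8", "5"))
-- ===== Notes on version B (the rewrite author's own statement) =====
-- stated objective: simpler
-- what changed: Replaces A's four sequential loops (digit-list build, power sum, base-9 decompose, base-9 reconstruct) with a single recursion computing the base-8 reinterpretation directly, dropping the base-9 roundtrip which is the identity.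
import Mathlib
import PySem

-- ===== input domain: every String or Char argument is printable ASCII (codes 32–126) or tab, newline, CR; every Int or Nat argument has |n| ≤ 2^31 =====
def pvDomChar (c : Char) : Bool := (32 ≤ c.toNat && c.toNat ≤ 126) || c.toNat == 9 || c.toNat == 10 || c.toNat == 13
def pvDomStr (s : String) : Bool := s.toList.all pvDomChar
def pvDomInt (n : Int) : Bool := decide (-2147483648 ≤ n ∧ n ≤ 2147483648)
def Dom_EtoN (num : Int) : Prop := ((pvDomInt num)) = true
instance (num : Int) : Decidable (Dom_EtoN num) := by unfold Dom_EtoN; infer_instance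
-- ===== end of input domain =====

-- B replaces A's four loops (digit list, power sum, base-9 decompose, base-9 reconstruct)
-- with one recursion; the base-9 roundtrip is the identity. Equality of return values is proved.

-- ===== PORT A =====
-- A's two 'while x > 0: digits.append(x % base); x //= base' loops (base = 10 resp. 9);
-- hb is only a totality guard for the recursion (both call sites satisfy it)
def pvDigitsLoop (base : Int) (hb : 2 ≤ base) (x : Int) (acc : List Int) : List Int :=
  if h : x > 0 then
    pvDigitsLoop base hb (PySem.Int.floordiv x base) (acc ++ [PySem.Int.mod x base])
  else acc
termination_by x.toNat
decreasing_by
  have h1 : PySem.Int.floordiv x base < x :=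
    (PySem.Int.floordiv_lt_iff_lt_mul (by omega)).mpr
      (by nlinarith [mul_pos h (show (0 : Int) < base - 1 by omega)])
  omega

def EtoN (num : Int) : Int :=
  let E_digits : List Int := pvDigitsLoop 10 (by norm_num) num []
  let Ten : Int :=
    (PySem.List.pyRange 0 (E_digits.length : Int) 1).foldl
      (fun (t : Int) (i : Int) => t + (PySem.List.pyGetD E_digits i 0) * 8 ^ i.toNat) 0
  let N_digits : List Int := pvDigitsLoop 9 (by norm_num) Ten []
  let Nine : Int :=
    (PySem.List.pyRange 0 (N_digits.length : Int) 1).foldl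
      (fun (t : Int) (i : Int) => t + (PySem.List.pyGetD N_digits i 0) * 9 ^ i.toNat) 0
  -- int(str(Nine).replace("8","5")); int() never raises here (the argument is a digit string)
  (PySem.Int.ofStr? (PySem.Str.replace (PySem.Int.toStr Nine) "8" "5")).getD 0

-- ===== PORT B =====
def pvReinterp (n : Int) : Int :=
  if h : n ≤ 0 then 0
  else PySem.Int.mod n 10 + 8 * pvReinterp (PySem.Int.floordiv n 10)
termination_by n.toNat
decreasing_by
  rw [show PySem.Int.floordiv n 10 = n / 10 from
    PySem.Int.floordiv_eq_ediv_of_pos (by omega)]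
  omega

def EtoN_alt (num : Int) : Int :=
  -- int(str(reinterp(num)).replace("8","5")); int() never raises here (digit string)
  (PySem.Int.ofStr? (PySem.Str.replace (PySem.Int.toStr (pvReinterp num)) "8" "5")).getD 0

-- ===== PRECONDITION & SPEC =====
def Spec_EtoN (num : Int) (out : Int) : Prop := out = EtoN_alt num
instance (num : Int) (out : Int) : Decidable (Spec_EtoN num out) := by unfold Spec_EtoN; infer_instance

-- ===== CLAIM (what is proved, stated in full; the proofs are below) =====
def Claim_equal_EtoN : Prop := ∀ (num : Int), Dom_EtoN num → Spec_EtoN num (EtoN num)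

-- ===== LEMMAS AND PROOFS =====

-- value of a little-endian digit list in base b
def pvFromD (b : Int) : List Int → Int
  | [] => 0
  | d :: ds => d + b * pvFromD b ds

theorem pvDigitsLoop_acc (base : Int) (hb : 2 ≤ base) (x : Int) (acc : List Int) :
    pvDigitsLoop base hb x acc = acc ++ pvDigitsLoop base hb x [] := by
  by_cases h : x > 0
  · conv_lhs => rw [pvDigitsLoop]
    conv_rhs => rw [pvDigitsLoop]
    rw [dif_pos h, dif_pos h,
      pvDigitsLoop_acc base hb (PySem.Int.floordiv x base) (acc ++ [PySem.Int.mod x base]),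
      pvDigitsLoop_acc base hb (PySem.Int.floordiv x base) ([] ++ [PySem.Int.mod x base])]
    simp
  · conv_lhs => rw [pvDigitsLoop]
    conv_rhs => rw [pvDigitsLoop]
    rw [dif_neg h, dif_neg h]
    simp
termination_by x.toNat
decreasing_by
  all_goals
    have h1 : PySem.Int.floordiv x base < x :=
      (PySem.Int.floordiv_lt_iff_lt_mul (by omega)).mpr
        (by nlinarith [mul_pos h (show (0 : Int) < base - 1 by omega)])
    omega

theorem pvFoldl_pow (b : Int) (E : List Int) :
    ∀ (k : Nat) (acc : Int),
      (List.range E.length).foldl (fun t i => t + E.getD i 0 * b ^ (i + k)) acc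
        = acc + b ^ k * pvFromD b E := by
  induction E with
  | nil => intro k acc; simp [pvFromD]
  | cons d ds ih =>
    intro k acc
    rw [List.length_cons, List.range_succ_eq_map, List.foldl_cons, List.foldl_map]
    have hfun : (fun (t : Int) (i : Nat) => t + (d :: ds).getD i.succ 0 * b ^ (i.succ + k))
        = fun (t : Int) (i : Nat) => t + ds.getD i 0 * b ^ (i + (k + 1)) := by
      funext t i
      have : i.succ + k = i + (k + 1) := by omega
      rw [List.getD_cons_succ, this]
    rw [hfun, ih (k + 1)]
    simp only [List.getD_cons_zero, pvFromD, pow_succ]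
    ring

-- A's 'for i in range(len(L)): t += L[i] * b**i' sum equals pvFromD b L
theorem pvSum_eq (b : Int) (E : List Int) :
    (PySem.List.pyRange 0 (E.length : Int) 1).foldl
      (fun (t : Int) (i : Int) => t + (PySem.List.pyGetD E i 0) * b ^ i.toNat) 0
      = pvFromD b E := by
  rw [PySem.List.pyRange_zero_nat, List.foldl_map]
  have hfun : (fun (t : Int) (i : Nat) => t + (PySem.List.pyGetD E (i : Int) 0) * b ^ ((i : Int)).toNat)
      = fun (t : Int) (i : Nat) => t + E.getD i 0 * b ^ (i + 0) := by
    funext t i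
    rw [PySem.List.pyGetD_natCast, Int.toNat_natCast, Nat.add_zero]
  rw [hfun, pvFoldl_pow b E 0 0]
  simp

theorem pvFromD_digits10 (n : Int) :
    pvFromD 8 (pvDigitsLoop 10 (by norm_num) n []) = pvReinterp n := by
  by_cases h : n > 0
  · conv_lhs => rw [pvDigitsLoop]
    conv_rhs => rw [pvReinterp]
    rw [dif_pos h, dif_neg (by omega), List.nil_append,
      pvDigitsLoop_acc 10 (by norm_num) (PySem.Int.floordiv n 10) [PySem.Int.mod n 10],
      List.singleton_append, pvFromD, pvFromD_digits10 (PySem.Int.floordiv n 10)]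
  · conv_lhs => rw [pvDigitsLoop]
    conv_rhs => rw [pvReinterp]
    rw [dif_neg h, dif_pos (by omega)]
    rfl
termination_by n.toNat
decreasing_by
  rw [show PySem.Int.floordiv n 10 = n / 10 from
    PySem.Int.floordiv_eq_ediv_of_pos (by omega)]
  omega

theorem pvReinterp_nonneg (n : Int) : 0 ≤ pvReinterp n := by
  rw [pvReinterp]
  by_cases h : n ≤ 0
  · rw [dif_pos h]
  · rw [dif_neg h]
    have h1 : 0 ≤ PySem.Int.mod n 10 := PySem.Int.mod_nonneg n (by norm_num)
    have h2 : 0 ≤ pvReinterp (PySem.Int.floordiv n 10) :=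
      pvReinterp_nonneg (PySem.Int.floordiv n 10)
    omega
termination_by n.toNat
decreasing_by
  rw [show PySem.Int.floordiv n 10 = n / 10 from
    PySem.Int.floordiv_eq_ediv_of_pos (by omega)]
  omega

-- the base-9 decompose-then-reconstruct in A is the identity on nonnegative ints
theorem pvRoundtrip9 (t : Int) (ht : 0 ≤ t) :
    pvFromD 9 (pvDigitsLoop 9 (by norm_num) t []) = t := by
  by_cases h : t > 0
  · conv_lhs => rw [pvDigitsLoop]
    rw [dif_pos h, List.nil_append,
      pvDigitsLoop_acc 9 (by norm_num) (PySem.Int.floordiv t 9) [PySem.Int.mod t 9],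
      List.singleton_append, pvFromD, pvRoundtrip9 (PySem.Int.floordiv t 9)
        (by rw [PySem.Int.floordiv_eq_ediv_of_pos (by omega)]; omega)]
    have := PySem.Int.floordiv_mul_add_mod t 9
    omega
  · conv_lhs => rw [pvDigitsLoop]
    rw [dif_neg h]
    show (0 : Int) = t
    omega
termination_by t.toNat
decreasing_by
  rw [show PySem.Int.floordiv t 9 = t / 9 from
    PySem.Int.floordiv_eq_ediv_of_pos (by omega)]
  omega

-- ===== VERDICT (by name: the statement is the Claim_ definition above) =====
theorem EtoN_spec : Claim_equal_EtoN := by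
  intro num _
  show EtoN num = EtoN_alt num
  simp only [EtoN, EtoN_alt]
  rw [pvSum_eq 8, pvFromD_digits10, pvSum_eq 9,
    pvRoundtrip9 _ (pvReinterp_nonneg num)]
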